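-- pv_equiv track=rewrite | github.com/Mihir-Panjikar/EduQuery | modules/Simple_preprocess.py | _split_text_with_separator
-- ===== SOURCE A (Python) =====
-- from typing import List
--
-- def _split_text_with_separator(text: str, separator: str) -> List[str]:
--     """Splits text by separator, keeping the separator with the preceding part."""
--     parts = []
--     current_pos = 0
--     while True:
--         idx = text.find(separator, current_pos)
--         if idx == -1:
--             parts.append(text[current_pos:])
--             break
--         parts.append(text[current_pos: idx + len(separator)])
--         current_pos = idx + len(separator)
--     # Filtering out empty strings that might result from consecutive separators
--     return [p for p in parts if p]
-- ===== SOURCE B (Python) =====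
-- from typing import List
--
-- def _split_text_with_separator(text: str, separator: str) -> List[str]:
--     """Splits text by separator, keeping the separator with the preceding part."""
--     pieces = text.split(separator)
--     result = []
--     last = len(pieces) - 1
--     for i, piece in enumerate(pieces):
--         part = piece + separator if i < last else piece
--         if part:
--             result.append(part)
--     return result
-- ===== Notes on version B (the rewrite author's own statement) =====
-- stated objective: simpler
-- what changed: Replaces A's manual find-loop over positions with a split-then-reattach pass: split once on the separator, re-append the separator to every piece but the last, and keep the non-empty parts.
import Mathlib
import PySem

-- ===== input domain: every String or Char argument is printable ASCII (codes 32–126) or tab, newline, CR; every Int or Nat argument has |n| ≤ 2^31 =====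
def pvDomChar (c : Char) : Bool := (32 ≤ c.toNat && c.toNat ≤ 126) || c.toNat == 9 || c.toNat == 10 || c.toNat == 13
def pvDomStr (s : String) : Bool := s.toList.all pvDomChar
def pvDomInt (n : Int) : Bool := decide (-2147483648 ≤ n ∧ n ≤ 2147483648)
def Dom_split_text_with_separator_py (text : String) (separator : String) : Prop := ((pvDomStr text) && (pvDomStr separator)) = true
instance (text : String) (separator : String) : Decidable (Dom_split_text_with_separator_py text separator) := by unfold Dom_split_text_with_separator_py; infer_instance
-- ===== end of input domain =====

-- B replaces A's manual find-loop with split-then-reattach (split once, re-append the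
-- separator to every piece but the last, keep non-empty parts): simpler decomposition, same cost.

-- ===== PORT A =====
-- A's 'while True' find loop; fuel = |text|+1 suffices whenever separator ≠ "" (each
-- iteration advances current_pos by ≥ 1); fuel can run out only outside Pre_.
def splitA_go (text : String) (separator : String) (fuel : Nat) (currentPos : Int)
    (parts : List String) : List String :=
  match fuel with
  | 0 => parts
  | fuel + 1 =>
    let idx := PySem.Str.findFrom text separator currentPos
    if idx = -1 then parts ++ [PySem.Str.slice text (some currentPos) none]
    else
      splitA_go text separator fuel (idx + PySem.Str.len separator)
        (parts ++ [PySem.Str.slice text (some currentPos) (some (idx + PySem.Str.len separator))])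

def split_text_with_separator_py (text : String) (separator : String) : List String :=
  (splitA_go text separator (text.toList.length + 1) 0 []).filter (fun p => p ≠ "")

-- ===== PORT B =====
def split_text_with_separator_py_alt (text : String) (separator : String) : List String :=
  match PySem.Str.split? text separator with
  | none => []   -- text.split('') raises ValueError; outside Pre_
  | some pieces =>
    let last : Int := PySem.List.len pieces - 1
    (PySem.List.enumerate pieces).foldl
      (fun result ip =>
        let part := if ip.1 < last then ip.2 ++ separator else ip.2
        if part ≠ "" then result ++ [part] else result) []

-- ===== PRECONDITION & SPEC =====
-- Pre_ excludes separator = "": there A's while-loop never terminates (text.find('', p) = p),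
-- so A returns on exactly the inputs with a non-empty separator.
def Pre_split_text_with_separator_py (text : String) (separator : String) : Prop :=
  separator ≠ ""
instance (text : String) (separator : String) : Decidable (Pre_split_text_with_separator_py text separator) := by unfold Pre_split_text_with_separator_py; infer_instance

def pvWitness_split_text_with_separator_py : String × String := ("a,b,,c", ",")

def Spec_split_text_with_separator_py (text : String) (separator : String) (out : List String) : Prop := out = split_text_with_separator_py_alt text separator
instance (text : String) (separator : String) (out : List String) : Decidable (Spec_split_text_with_separator_py text separator out) := by unfold Spec_split_text_with_separator_py; infer_instance

-- ===== CLAIM (what is proved, stated in full; the proofs are below) =====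
def Claim_equal_split_text_with_separator_py : Prop := ∀ (text : String) (separator : String), Dom_split_text_with_separator_py text separator → Pre_split_text_with_separator_py text separator → Spec_split_text_with_separator_py text separator (split_text_with_separator_py text separator)

-- ===== LEMMAS AND PROOFS =====

-- The common skeleton both programs compute: the pieces of 'text.split(sep)',
-- characterised by the first occurrence of sep ('find'), as A's loop sees them.
def goSpec (sep : List Char) (hs : sep ≠ []) (l : List Char) : List (List Char) :=
  if h : PySem.Chars.find l sep = -1 then [l]
  else
    l.take (PySem.Chars.find l sep).toNat ::
      goSpec sep hs (l.drop ((PySem.Chars.find l sep).toNat + sep.length))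
termination_by l.length
decreasing_by
  have hinf : sep <:+: l := (PySem.Chars.find_ne_neg_one_iff l sep).mp h
  have hl : l ≠ [] := by
    rintro rfl
    exact hs (List.eq_nil_of_infix_nil hinf)
  have : 0 < l.length := List.length_pos_iff.mpr hl
  have : 0 < sep.length := List.length_pos_iff.mpr hs
  simp only [List.length_drop]
  omega

lemma goSpec_ne_nil (sep : List Char) (hs : sep ≠ []) (l : List Char) :
    goSpec sep hs l ≠ [] := by
  unfold goSpec
  split <;> simp

-- re-attach the separator to every piece but the last
def attachSep (sep : List Char) : List (List Char) → List (List Char)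
  | [] => []
  | [p] => [p]
  | p :: q :: rest => (p ++ sep) :: attachSep sep (q :: rest)

def attachStr (sep : String) : List String → List String
  | [] => []
  | [p] => [p]
  | p :: q :: rest => (p ++ sep) :: attachStr sep (q :: rest)

def consHead (pre : List Char) : List (List Char) → List (List Char)
  | [] => [pre]
  | x :: xs => (pre ++ x) :: xs

-- find = 0 at a prefix occurrence
lemma find_of_prefix (sep l : List Char) (h : sep <+: l) : PySem.Chars.find l sep = 0 := by
  have hinf : sep <:+: l := h.isInfix
  have h0 : 0 ≤ PySem.Chars.find l sep := (PySem.Chars.find_nonneg_iff l sep).mpr hinf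
  obtain ⟨_, hmin⟩ := PySem.Chars.find_spec h0
  by_contra hne
  have hpos : 0 < (PySem.Chars.find l sep).toNat := by omega
  exact hmin 0 hpos (by simpa using h)

-- find on a cons without an occurrence at position 0
lemma find_cons (sep : List Char) (c : Char) (rest : List Char)
    (hnp : ¬ sep <+: (c :: rest)) :
    PySem.Chars.find (c :: rest) sep =
      if PySem.Chars.find rest sep = -1 then -1 else PySem.Chars.find rest sep + 1 := by
  by_cases hr : PySem.Chars.find rest sep = -1
  · simp only [hr, if_pos]
    rw [PySem.Chars.find_eq_neg_one_iff]
    intro hinf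
    rcases List.infix_cons_iff.mp hinf with h | h
    · exact hnp h
    · exact (PySem.Chars.find_eq_neg_one_iff rest sep).mp hr h
  · rw [if_neg hr]
    have hj : 0 ≤ PySem.Chars.find rest sep := by
      have := PySem.Chars.neg_one_le_find rest sep
      omega
    obtain ⟨hpre, hmin⟩ := PySem.Chars.find_spec hj
    have hinf : sep <:+: (c :: rest) :=
      List.infix_cons_iff.mpr (Or.inr ((PySem.Chars.find_ne_neg_one_iff rest sep).mp hr))
    have h0 : 0 ≤ PySem.Chars.find (c :: rest) sep :=
      (PySem.Chars.find_nonneg_iff _ sep).mpr hinf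
    obtain ⟨hpre', hmin'⟩ := PySem.Chars.find_spec h0
    set m := (PySem.Chars.find (c :: rest) sep).toNat with hm
    set j := (PySem.Chars.find rest sep).toNat with hjn
    have hmj : m = j + 1 := by
      by_contra hne
      rcases Nat.lt_or_ge m (j + 1) with hlt | hge
      · rcases Nat.eq_zero_or_pos m with h0' | hpos
        · rw [h0'] at hpre'; exact hnp (by simpa using hpre')
        · obtain ⟨m', hm'⟩ := Nat.exists_eq_add_of_lt hpos
          have hm2 : m = m' + 1 := by omega
          have hno : ¬ sep <+: rest.drop m' := hmin m' (by omega)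
          rw [hm2, List.drop_succ_cons] at hpre'
          exact hno hpre'
      · have : ¬ sep <+: (c :: rest).drop (j + 1) := hmin' (j + 1) (by omega)
        exact this (by simpa [List.drop_succ_cons] using hpre)
    have t1 := Int.toNat_of_nonneg h0
    have t2 := Int.toNat_of_nonneg hj
    omega

-- the PySem splitOn loop computes goSpec (accumulator invariant)
lemma splitOn_go_spec (sep : List Char) (hs : sep ≠ []) :
    ∀ (fuel : Nat) (l cur : List Char) (acc : List (List Char)), l.length < fuel →
      PySem.Chars.splitOn.go sep fuel l cur acc =
        acc.reverse ++ consHead cur.reverse (goSpec sep hs l) := by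
  intro fuel
  induction fuel with
  | zero => intro l cur acc h; omega
  | succ f ih =>
    intro l cur acc h
    match l with
    | [] =>
      rw [PySem.Chars.splitOn.go]
      have : goSpec sep hs [] = [[]] := by
        rw [goSpec]
        have : PySem.Chars.find [] sep = -1 := by
          rw [PySem.Chars.find_eq_neg_one_iff]
          intro hinf; exact hs (List.eq_nil_of_infix_nil hinf)
        simp [this]
      simp [this, consHead]
      omega
    | c :: rest =>
      rw [PySem.Chars.splitOn.go]
      by_cases hp : sep.isPrefixOf (c :: rest) = true
      · simp only [hp, if_pos]
        have hpre : sep <+: (c :: rest) := List.isPrefixOf_iff_prefix.mp hp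
        have hf0 : PySem.Chars.find (c :: rest) sep = 0 := find_of_prefix sep _ hpre
        have hlen : ((c :: rest).drop sep.length).length < f := by
          have h1 : 0 < sep.length := List.length_pos_iff.mpr hs
          simp only [List.length_drop, List.length_cons]
          simp only [List.length_cons] at h
          omega
        rw [ih _ [] _ hlen]
        have hg : goSpec sep hs (c :: rest) =
            [] :: goSpec sep hs ((c :: rest).drop sep.length) := by
          rw [goSpec]
          simp [hf0]
        rw [hg]
        cases hgr : goSpec sep hs ((c :: rest).drop sep.length) with
        | nil => exact absurd hgr (goSpec_ne_nil sep hs _)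
        | cons x xs => simp [consHead]
      · simp only [hp]
        have hnp : ¬ sep <+: (c :: rest) := fun hc => hp (List.isPrefixOf_iff_prefix.mpr hc)
        have hlen : rest.length < f := by simp only [List.length_cons] at h; omega
        rw [if_neg (by simp [hp]), ih rest (c :: cur) acc hlen]
        congr 1
        have hfc := find_cons sep c rest hnp
        by_cases hr : PySem.Chars.find rest sep = -1
        · have hgl : goSpec sep hs (c :: rest) = [c :: rest] := by
            rw [goSpec]; simp [hfc, hr]
          have hgr : goSpec sep hs rest = [rest] := by
            rw [goSpec]; simp [hr]
          simp [hgl, hgr, consHead]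
        · have hj : 0 ≤ PySem.Chars.find rest sep := by
            have := PySem.Chars.neg_one_le_find rest sep; omega
          have hfc' : PySem.Chars.find (c :: rest) sep = PySem.Chars.find rest sep + 1 := by
            rw [hfc, if_neg hr]
          have hgl : goSpec sep hs (c :: rest) =
              (c :: rest.take (PySem.Chars.find rest sep).toNat) ::
                goSpec sep hs (rest.drop ((PySem.Chars.find rest sep).toNat + sep.length)) := by
            rw [goSpec]
            have hne : ¬ PySem.Chars.find (c :: rest) sep = -1 := by rw [hfc']; omega
            have ht : ((PySem.Chars.find (c :: rest) sep).toNat) =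
                (PySem.Chars.find rest sep).toNat + 1 := by rw [hfc']; omega
            simp only [hne, dite_false, ht, List.take_succ_cons]
            congr 1
            have : (PySem.Chars.find rest sep).toNat + 1 + sep.length =
                ((PySem.Chars.find rest sep).toNat + sep.length) + 1 := by omega
            rw [this, List.drop_succ_cons]
          have hgr : goSpec sep hs rest =
              rest.take (PySem.Chars.find rest sep).toNat ::
                goSpec sep hs (rest.drop ((PySem.Chars.find rest sep).toNat + sep.length)) := by
            rw [goSpec]; simp [hr]
          simp [hgl, hgr, consHead]
  
lemma splitOn_eq_goSpec (s sep : List Char) (hs : sep ≠ []) :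
    PySem.Chars.splitOn s sep = goSpec sep hs s := by
  rw [PySem.Chars.splitOn, splitOn_go_spec sep hs (s.length + 1) s [] [] (by omega)]
  cases hg : goSpec sep hs s with
  | nil => exact absurd hg (goSpec_ne_nil sep hs s)
  | cons x xs => simp [consHead]

-- taking through the separator occurrence
lemma take_append_of_prefix_drop (l sub : List Char) (j : Nat) (hj : j ≤ l.length)
    (h : sub <+: l.drop j) : l.take j ++ sub = l.take (j + sub.length) := by
  obtain ⟨t, ht⟩ := h
  have hl : l = l.take j ++ l.drop j := (List.take_append_drop j l).symm
  rw [List.take_add]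
  congr 1
  rw [← ht]
  simp [List.take_left']

-- A's loop computes the attached pieces of goSpec on the remaining suffix
lemma splitA_go_spec (text separator : String) (hs : separator.toList ≠ []) :
    ∀ (fuel : Nat) (pos : Nat) (parts : List String),
      pos ≤ text.toList.length → text.toList.length - pos < fuel →
      splitA_go text separator fuel (pos : Int) parts =
        parts ++ (attachSep separator.toList
          (goSpec separator.toList hs (text.toList.drop pos))).map String.ofList := by
  intro fuel
  induction fuel with
  | zero => intro pos parts h1 h2; omega
  | succ f ih =>
    intro pos parts hpos hfuel
    rw [splitA_go]
    have hff : PySem.Str.findFrom text separator (pos : Int) =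
        (if PySem.Chars.find (text.toList.drop pos) separator.toList = -1 then -1
          else (pos : Int) + PySem.Chars.find (text.toList.drop pos) separator.toList) := by
      rw [PySem.Str.findFrom]
      exact PySem.Chars.findFrom_natCast text.toList separator.toList pos hpos
    set rem := text.toList.drop pos with hrem
    by_cases hf : PySem.Chars.find rem separator.toList = -1
    · simp only [hff, hf, if_pos]
      have hg : goSpec separator.toList hs rem = [rem] := by rw [goSpec]; simp [hf]
      rw [hg]
      have : PySem.Str.slice text (some (pos : Int)) none = String.ofList rem := by
        rw [PySem.Str.slice]
        congr 1
        simp [PySem.List.slice_from_natCast, hrem]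
      simp [attachSep, this]
    · have hj0 : 0 ≤ PySem.Chars.find rem separator.toList := by
        have := PySem.Chars.neg_one_le_find rem separator.toList; omega
      set j := (PySem.Chars.find rem separator.toList).toNat with hjdef
      obtain ⟨hpre, _⟩ := PySem.Chars.find_spec hj0
      have hjlen : j ≤ rem.length := by
        have := PySem.Chars.find_le_length rem separator.toList; omega
      have hm1 : 0 < separator.toList.length := List.length_pos_iff.mpr hs
      have hls : separator.toList.length = separator.length := by simp
      have hseplen : separator.toList.length ≤ rem.length - j := by
        have := hpre.length_le
        simp [List.length_drop] at this
        omega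
      have hremlen : rem.length = text.toList.length - pos := by
        rw [hrem]; simp [List.length_drop]
      set m := separator.toList.length with hmdef
      have hfind : PySem.Chars.find rem separator.toList = (j : Int) :=
        (Int.toNat_of_nonneg hj0).symm
      have hidx : (if PySem.Chars.find rem separator.toList = -1 then (-1 : Int)
          else (pos : Int) + PySem.Chars.find rem separator.toList) + PySem.Str.len separator
          = ((pos + j + m : Nat) : Int) := by
        rw [if_neg hf, PySem.Str.len, hfind]
        push_cast
        omega
      have hne : ¬ (if PySem.Chars.find rem separator.toList = -1 then (-1 : Int)
          else (pos : Int) + PySem.Chars.find rem separator.toList) = -1 := by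
        rw [if_neg hf]; omega
      rw [hff]
      simp only [hne, if_false, hidx]
      have hpos' : pos + j + m ≤ text.toList.length := by omega
      have hfuel' : text.toList.length - (pos + j + m) < f := by omega
      rw [ih (pos + j + m) _ hpos' hfuel']
      have hdrop : text.toList.drop (pos + j + m) = rem.drop (j + m) := by
        rw [hrem, List.drop_drop]
        congr 1
        omega
      have hslice : PySem.Str.slice text (some (pos : Int)) (some ((pos + j + m : Nat) : Int)) =
          String.ofList (rem.take (j + m)) := by
        rw [PySem.Str.slice]
        congr 1
        simp only [PySem.Chars.slice_eq_listSlice]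
        rw [PySem.List.slice_natCast]
        congr 1
        omega
      have hgl : goSpec separator.toList hs rem =
          rem.take j :: goSpec separator.toList hs (rem.drop (j + m)) := by
        rw [goSpec]; simp [hf, ← hjdef, ← hmdef]
      have htake : rem.take j ++ separator.toList = rem.take (j + m) :=
        take_append_of_prefix_drop rem separator.toList j hjlen hpre
      rw [hdrop, hgl]
      cases hgr : goSpec separator.toList hs (rem.drop (j + m)) with
      | nil => exact absurd hgr (goSpec_ne_nil _ hs _)
      | cons q qs =>
        simp only [attachSep, List.map_cons, htake, hslice]
        simp

-- String-level attach commutes with ofList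
lemma attachStr_map_ofList (sep : String) (ps : List (List Char)) :
    attachStr sep (ps.map String.ofList) =
      (attachSep sep.toList ps).map String.ofList := by
  induction ps with
  | nil => simp [attachStr, attachSep]
  | cons p rest ih =>
    cases rest with
    | nil => simp [attachStr, attachSep]
    | cons q t =>
      simp only [List.map_cons] at ih ⊢
      rw [attachStr, attachSep]
      simp only [List.map_cons, ih]
      congr 1
      apply String.ext
      simp

-- index-threaded attach for B's fold
def attachFrom (sep : String) (last : Int) (k : Int) : List String → List String
  | [] => []
  | p :: rest => (if k < last then p ++ sep else p) :: attachFrom sep last (k + 1) rest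

lemma foldl_enumerate_attach (sep : String) (last : Int) :
    ∀ (ps : List String) (k : Int) (res : List String),
      (PySem.List.enumerate ps k).foldl
        (fun result ip =>
          let part := if ip.1 < last then ip.2 ++ sep else ip.2
          if part ≠ "" then result ++ [part] else result) res
      = res ++ (attachFrom sep last k ps).filter (fun p => p ≠ "") := by
  intro ps
  induction ps with
  | nil => intro k res; simp [PySem.List.enumerate, attachFrom]
  | cons p rest ih =>
    intro k res
    rw [PySem.List.enumerate, List.foldl_cons, ih]
    rw [attachFrom, List.filter_cons]
    by_cases hp : (if k < last then p ++ sep else p) ≠ ""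
    · simp [hp]
    · simp only [hp, if_false]
      simp at hp
      simp [hp]

lemma attachFrom_eq_attachStr (sep : String) :
    ∀ (ps : List String) (k : Int), ps ≠ [] →
      attachFrom sep (k + (ps.length : Int) - 1) k ps = attachStr sep ps := by
  intro ps
  induction ps with
  | nil => intro k h; exact absurd rfl h
  | cons p rest ih =>
    intro k _
    cases rest with
    | nil =>
      rw [attachFrom, attachStr]
      simp [attachFrom]
    | cons q t =>
      rw [attachFrom, attachStr]
      have h1 : k < k + (((p :: q :: t).length : Nat) : Int) - 1 := by
        simp [List.length_cons]; omega
      have h2 : k + (((p :: q :: t).length : Nat) : Int) - 1 =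
          (k + 1) + (((q :: t).length : Nat) : Int) - 1 := by
        simp [List.length_cons]; omega
      rw [if_pos h1, h2, ih (k + 1) (by simp)]

-- ===== VERDICT (by name: the statement is the Claim_ definition above) =====
theorem split_text_with_separator_py_spec : Claim_equal_split_text_with_separator_py := by
  intro text separator _ hpre
  unfold Spec_split_text_with_separator_py
  have hs : separator.toList ≠ [] := by
    intro h
    exact hpre (String.ext (by simp [h]))
  -- A side
  rw [split_text_with_separator_py]
  have hA := splitA_go_spec text separator hs (text.toList.length + 1) 0 [] (by omega) (by omega)
  simp only [Nat.cast_zero] at hA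
  rw [hA]
  simp only [List.drop_zero, List.nil_append]
  -- B side
  rw [split_text_with_separator_py_alt]
  have hsplit : PySem.Str.split? text separator =
      some ((goSpec separator.toList hs text.toList).map String.ofList) := by
    rw [PySem.Str.split?, PySem.Chars.split?]
    have : separator.toList.isEmpty = false := by
      cases h : separator.toList with
      | nil => exact absurd h hs
      | cons a t => simp
    rw [this]
    simp [splitOn_eq_goSpec text.toList separator.toList hs]
  rw [hsplit]
  simp only
  set pieces := (goSpec separator.toList hs text.toList).map String.ofList with hpieces
  rw [foldl_enumerate_attach separator (PySem.List.len pieces - 1) pieces 0 []]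
  have hne : pieces ≠ [] := by
    rw [hpieces]
    simp [goSpec_ne_nil separator.toList hs text.toList]
  have hlen : PySem.List.len pieces - 1 = 0 + (pieces.length : Int) - 1 := by
    rw [PySem.List.len_eq]; omega
  rw [hlen, attachFrom_eq_attachStr separator pieces 0 hne]
  rw [hpieces, attachStr_map_ofList]
  simp
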